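-- pv_equiv track=rewrite | github.com/mickeylailai/Chess | pawns_eval.py | find_passed
-- ===== SOURCE A (Python) =====
-- def get_file(sq): return sq % 8
--
-- def get_rank(sq): return sq // 8
--
-- def find_passed(my_pawns, enemy_pawns, color):
--     passed = set()
--     enemy_files = {}
--     for sq in enemy_pawns:
--         f, r = get_file(sq), get_rank(sq)
--         if f not in enemy_files:
--             enemy_files[f] = r
--         else:
--             if color == 1:
--                 enemy_files[f] = min(enemy_files[f], r)
--             else:
--                 enemy_files[f] = max(enemy_files[f], r)
--
--     for sq in my_pawns:
--         f, r = get_file(sq), get_rank(sq)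
--         blocked = False
--
--         for df in [-1, 0, 1]:
--             nf = f + df
--             if nf in enemy_files:
--                 enemy_r = enemy_files[nf]
--                 if color == 1 and enemy_r < r: blocked = True
--                 if color == -1 and enemy_r > r: blocked = True
--
--         if not blocked:
--             passed.add(sq)
--
--     return passed
-- ===== SOURCE B (Python) =====
-- def find_passed(my_pawns, enemy_pawns, color):
--     passed = set()
--     for sq in my_pawns:
--         f, r = sq % 8, sq // 8
--         blocked = any(
--             esq % 8 in (f - 1, f, f + 1)
--             and ((color == 1 and esq // 8 < r) or (color == -1 and esq // 8 > r))
--             for esq in enemy_pawns)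
--         if not blocked:
--             passed.add(sq)
--     return passed
-- ===== Notes on version B (the rewrite author's own statement) =====
-- stated objective: simpler
-- what changed: Drops A's per-file min/max dict precomputation; B decides blocking by a direct existential scan of enemy_pawns per pawn (any() with the same adjacency and rank test), which is shorter and needs no mutable aggregate.
import Mathlib
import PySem

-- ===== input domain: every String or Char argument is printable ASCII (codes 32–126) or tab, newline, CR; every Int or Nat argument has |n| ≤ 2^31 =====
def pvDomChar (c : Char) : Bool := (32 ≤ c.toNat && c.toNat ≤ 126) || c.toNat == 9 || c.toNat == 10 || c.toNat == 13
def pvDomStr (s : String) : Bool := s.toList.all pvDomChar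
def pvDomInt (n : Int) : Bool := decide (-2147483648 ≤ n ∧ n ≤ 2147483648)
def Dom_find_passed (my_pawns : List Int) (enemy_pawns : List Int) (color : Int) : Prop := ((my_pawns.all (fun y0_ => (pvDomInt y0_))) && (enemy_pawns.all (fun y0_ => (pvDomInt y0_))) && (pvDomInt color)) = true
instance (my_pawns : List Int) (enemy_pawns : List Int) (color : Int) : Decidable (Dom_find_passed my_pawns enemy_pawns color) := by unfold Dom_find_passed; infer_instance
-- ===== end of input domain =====

-- B replaces A's per-file min/max dict with a direct existential scan of enemy_pawns per pawn (simpler).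

-- ===== PORT A =====
-- one build-loop step of A: record/aggregate the enemy pawn's rank under its file
def fp_buildStep (color : Int) (d : PySem.Dict Int Int) (sq : Int) : PySem.Dict Int Int :=
  let f := PySem.Int.mod sq 8
  let r := PySem.Int.floordiv sq 8
  if d.contains f = false then d.insert f r
  else if color = 1 then d.insert f (min (d.getD f 0) r)
  else d.insert f (max (d.getD f 0) r)

-- the inner 'for df in [-1, 0, 1]' loop of A computing 'blocked'
def fp_blocked (ef : PySem.Dict Int Int) (color : Int) (f : Int) (r : Int) : Bool :=
  [(-1 : Int), 0, 1].foldl (fun blocked df =>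
    let nf := f + df
    match ef.get? nf with
    | some enemy_r =>
        let b := if color = 1 ∧ enemy_r < r then true else blocked
        if color = -1 ∧ enemy_r > r then true else b
    | none => blocked) false

def find_passed (my_pawns : List Int) (enemy_pawns : List Int) (color : Int) : List Int :=
  let enemy_files := enemy_pawns.foldl (fp_buildStep color) PySem.Dict.empty
  my_pawns.foldl (fun passed sq =>
    let f := PySem.Int.mod sq 8
    let r := PySem.Int.floordiv sq 8
    let blocked := fp_blocked enemy_files color f r
    if blocked = false then PySem.Set.add passed sq else passed) PySem.Set.empty

-- ===== PORT B =====
-- does this enemy pawn block a friendly pawn standing on file f / rank r?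
def fpb_blocks (color : Int) (f : Int) (r : Int) (esq : Int) : Bool :=
  let ef := PySem.Int.mod esq 8
  let er := PySem.Int.floordiv esq 8
  (ef == f - 1 || ef == f || ef == f + 1) &&
    ((color == 1 && decide (er < r)) || (color == -1 && decide (er > r)))

def find_passed_alt (my_pawns : List Int) (enemy_pawns : List Int) (color : Int) : List Int :=
  my_pawns.foldl (fun passed sq =>
    let f := PySem.Int.mod sq 8
    let r := PySem.Int.floordiv sq 8
    if enemy_pawns.any (fpb_blocks color f r) then passed
    else PySem.Set.add passed sq) PySem.Set.empty

-- ===== PRECONDITION & SPEC =====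
def Spec_find_passed (my_pawns : List Int) (enemy_pawns : List Int) (color : Int) (out : List Int) : Prop := out = find_passed_alt my_pawns enemy_pawns color
instance (my_pawns : List Int) (enemy_pawns : List Int) (color : Int) (out : List Int) : Decidable (Spec_find_passed my_pawns enemy_pawns color out) := by unfold Spec_find_passed; infer_instance

-- ===== CLAIM (what is proved, stated in full; the proofs are below) =====
def Claim_equal_find_passed : Prop := ∀ (my_pawns : List Int) (enemy_pawns : List Int) (color : Int), Dom_find_passed my_pawns enemy_pawns color → Spec_find_passed my_pawns enemy_pawns color (find_passed my_pawns enemy_pawns color)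

-- ===== LEMMAS AND PROOFS =====

-- the dict has a stored value at k with the given strict relation to r iff one update supplied it
theorem fp_step_min (d : PySem.Dict Int Int) (F R0 k r : Int) :
    ((∃ er, (if d.contains F = false then d.insert F R0
            else if (1 : Int) = 1 then d.insert F (min (d.getD F 0) R0)
            else d.insert F (max (d.getD F 0) R0)).get? k = some er ∧ er < r) ↔
      (∃ er, d.get? k = some er ∧ er < r) ∨ (F = k ∧ R0 < r)) := by
  have hsome : d.contains F = true → d.get? F = some (d.getD F 0) := by
    intro hct
    cases h : d.get? F with
    | none => rw [(PySem.Dict.get?_eq_none_iff_contains d F).mp h] at hct; cases hct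
    | some v => rw [PySem.Dict.getD_of_get?_eq_some d (0 : Int) h]
  by_cases hc : d.contains F = false
  · rw [if_pos hc]
    by_cases hk : k = F
    · subst hk
      have hnone : d.get? k = none := (PySem.Dict.get?_eq_none_iff_contains d k).mpr hc
      rw [PySem.Dict.get?_insert]
      rw [if_pos rfl]
      constructor
      · rintro ⟨er, her, hlt⟩; injection her with h; subst h; exact Or.inr ⟨rfl, hlt⟩
      · rintro (⟨er, her, hlt⟩ | ⟨-, hlt⟩)
        · rw [hnone] at her; cases her
        · exact ⟨R0, rfl, hlt⟩
    · rw [PySem.Dict.get?_insert]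
      simp only [if_neg hk]
      constructor
      · exact Or.inl
      · rintro (h | ⟨hF, -⟩)
        · exact h
        · exact absurd hF.symm hk
  · have hct : d.contains F = true := by cases h : d.contains F <;> simp_all
    rw [if_neg hc, if_pos rfl]
    by_cases hk : k = F
    · subst hk
      rw [PySem.Dict.get?_insert, if_pos rfl]
      constructor
      · rintro ⟨er, her, hlt⟩
        injection her with h; subst h
        rcases min_lt_iff.mp hlt with h | h
        · exact Or.inl ⟨_, hsome hct, h⟩
        · exact Or.inr ⟨rfl, h⟩
      · rintro (⟨er, her, hlt⟩ | ⟨-, hlt⟩)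
        · rw [hsome hct] at her; injection her with h; subst h
          exact ⟨_, rfl, min_lt_iff.mpr (Or.inl hlt)⟩
        · exact ⟨_, rfl, min_lt_iff.mpr (Or.inr hlt)⟩
    · rw [PySem.Dict.get?_insert]
      simp only [if_neg hk]
      constructor
      · exact Or.inl
      · rintro (h | ⟨hF, -⟩)
        · exact h
        · exact absurd hF.symm hk

theorem fp_step_max (d : PySem.Dict Int Int) (F R0 k r : Int) :
    ((∃ er, (if d.contains F = false then d.insert F R0
            else if (-1 : Int) = 1 then d.insert F (min (d.getD F 0) R0)
            else d.insert F (max (d.getD F 0) R0)).get? k = some er ∧ er > r) ↔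
      (∃ er, d.get? k = some er ∧ er > r) ∨ (F = k ∧ R0 > r)) := by
  have hsome : d.contains F = true → d.get? F = some (d.getD F 0) := by
    intro hct
    cases h : d.get? F with
    | none => rw [(PySem.Dict.get?_eq_none_iff_contains d F).mp h] at hct; cases hct
    | some v => rw [PySem.Dict.getD_of_get?_eq_some d (0 : Int) h]
  by_cases hc : d.contains F = false
  · rw [if_pos hc]
    by_cases hk : k = F
    · subst hk
      have hnone : d.get? k = none := (PySem.Dict.get?_eq_none_iff_contains d k).mpr hc
      rw [PySem.Dict.get?_insert]
      rw [if_pos rfl]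
      constructor
      · rintro ⟨er, her, hlt⟩; injection her with h; subst h; exact Or.inr ⟨rfl, hlt⟩
      · rintro (⟨er, her, hlt⟩ | ⟨-, hlt⟩)
        · rw [hnone] at her; cases her
        · exact ⟨R0, rfl, hlt⟩
    · rw [PySem.Dict.get?_insert]
      simp only [if_neg hk]
      constructor
      · exact Or.inl
      · rintro (h | ⟨hF, -⟩)
        · exact h
        · exact absurd hF.symm hk
  · have hct : d.contains F = true := by cases h : d.contains F <;> simp_all
    rw [if_neg hc, if_neg (by norm_num)]
    by_cases hk : k = F
    · subst hk
      rw [PySem.Dict.get?_insert, if_pos rfl]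
      constructor
      · rintro ⟨er, her, hlt⟩
        injection her with h; subst h
        rcases lt_max_iff.mp hlt with h | h
        · exact Or.inl ⟨_, hsome hct, h⟩
        · exact Or.inr ⟨rfl, h⟩
      · rintro (⟨er, her, hlt⟩ | ⟨-, hlt⟩)
        · rw [hsome hct] at her; injection her with h; subst h
          exact ⟨_, rfl, lt_max_iff.mpr (Or.inl hlt)⟩
        · exact ⟨_, rfl, lt_max_iff.mpr (Or.inr hlt)⟩
    · rw [PySem.Dict.get?_insert]
      simp only [if_neg hk]
      constructor
      · exact Or.inl
      · rintro (h | ⟨hF, -⟩)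
        · exact h
        · exact absurd hF.symm hk

-- characterization of A's dict for color = 1: some stored rank < r on file k iff some enemy pawn on file k has rank < r
theorem fp_build_min_char (l : List Int) (d : PySem.Dict Int Int) (k r : Int) :
    ((∃ er, (l.foldl (fp_buildStep 1) d).get? k = some er ∧ er < r) ↔
      (∃ er, d.get? k = some er ∧ er < r) ∨
        ∃ esq ∈ l, PySem.Int.mod esq 8 = k ∧ PySem.Int.floordiv esq 8 < r) := by
  induction l generalizing d with
  | nil => simp
  | cons sq tl ih =>
      rw [List.foldl_cons, ih]
      have step := fp_step_min d (PySem.Int.mod sq 8) (PySem.Int.floordiv sq 8) k r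
      rw [show fp_buildStep 1 d sq =
            (if d.contains (PySem.Int.mod sq 8) = false then
              d.insert (PySem.Int.mod sq 8) (PySem.Int.floordiv sq 8)
            else if (1 : Int) = 1 then
              d.insert (PySem.Int.mod sq 8) (min (d.getD (PySem.Int.mod sq 8) 0) (PySem.Int.floordiv sq 8))
            else
              d.insert (PySem.Int.mod sq 8) (max (d.getD (PySem.Int.mod sq 8) 0) (PySem.Int.floordiv sq 8)))
          from rfl, step]
      constructor
      · rintro ((h | h) | h)
        · exact Or.inl h
        · exact Or.inr ⟨sq, List.mem_cons_self, h⟩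
        · rcases h with ⟨esq, hm, h⟩; exact Or.inr ⟨esq, List.mem_cons_of_mem _ hm, h⟩
      · rintro (h | ⟨esq, hm, h⟩)
        · exact Or.inl (Or.inl h)
        · rcases List.mem_cons.mp hm with rfl | hm
          · exact Or.inl (Or.inr h)
          · exact Or.inr ⟨esq, hm, h⟩

-- characterization of A's dict for color = -1 (the max branch)
theorem fp_build_max_char (l : List Int) (d : PySem.Dict Int Int) (k r : Int) :
    ((∃ er, (l.foldl (fp_buildStep (-1)) d).get? k = some er ∧ er > r) ↔
      (∃ er, d.get? k = some er ∧ er > r) ∨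
        ∃ esq ∈ l, PySem.Int.mod esq 8 = k ∧ PySem.Int.floordiv esq 8 > r) := by
  induction l generalizing d with
  | nil => simp
  | cons sq tl ih =>
      rw [List.foldl_cons, ih]
      have step := fp_step_max d (PySem.Int.mod sq 8) (PySem.Int.floordiv sq 8) k r
      rw [show fp_buildStep (-1) d sq =
            (if d.contains (PySem.Int.mod sq 8) = false then
              d.insert (PySem.Int.mod sq 8) (PySem.Int.floordiv sq 8)
            else if (-1 : Int) = 1 then
              d.insert (PySem.Int.mod sq 8) (min (d.getD (PySem.Int.mod sq 8) 0) (PySem.Int.floordiv sq 8))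
            else
              d.insert (PySem.Int.mod sq 8) (max (d.getD (PySem.Int.mod sq 8) 0) (PySem.Int.floordiv sq 8)))
          from rfl, step]
      constructor
      · rintro ((h | h) | h)
        · exact Or.inl h
        · exact Or.inr ⟨sq, List.mem_cons_self, h⟩
        · rcases h with ⟨esq, hm, h⟩; exact Or.inr ⟨esq, List.mem_cons_of_mem _ hm, h⟩
      · rintro (h | ⟨esq, hm, h⟩)
        · exact Or.inl (Or.inl h)
        · rcases List.mem_cons.mp hm with rfl | hm
          · exact Or.inl (Or.inr h)
          · exact Or.inr ⟨esq, hm, h⟩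

-- A's inner df-loop, spelled out as a lookup predicate over the three neighbouring files
theorem fp_blocked_iff (ef : PySem.Dict Int Int) (color f r : Int) :
    (fp_blocked ef color f r = true ↔
      ∃ df ∈ [(-1 : Int), 0, 1], ∃ er, ef.get? (f + df) = some er ∧
        ((color = 1 ∧ er < r) ∨ (color = -1 ∧ er > r))) := by
  unfold fp_blocked
  simp only [List.foldl_cons, List.foldl_nil, List.mem_cons, List.not_mem_nil, or_false]
  cases h1 : ef.get? (f + -1) <;> cases h2 : ef.get? (f + 0) <;> cases h3 : ef.get? (f + 1) <;>
    simp only [] <;>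
    constructor <;> intro h
  all_goals
    first
    | (rcases h with ⟨df, hdf, er, hget, hcond⟩
       rcases hdf with rfl | rfl | rfl <;> simp_all <;> tauto)
    | (split_ifs at h <;> simp_all <;>
       first
       | exact ⟨-1, Or.inl rfl, _, h1, by tauto⟩
       | exact ⟨0, Or.inr (Or.inl rfl), _, h2, by tauto⟩
       | exact ⟨1, Or.inr (Or.inr rfl), _, h3, by tauto⟩)
    | cases h

-- per-pawn agreement of A's dict-based test with B's direct scan
theorem blocked_agree (enemy_pawns : List Int) (color f r : Int) :
    fp_blocked (enemy_pawns.foldl (fp_buildStep color) PySem.Dict.empty) color f r =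
      enemy_pawns.any (fpb_blocks color f r) := by
  rw [Bool.eq_iff_iff, fp_blocked_iff, List.any_eq_true]
  have hfpb : ∀ esq, (fpb_blocks color f r esq = true ↔
      (PySem.Int.mod esq 8 = f - 1 ∨ PySem.Int.mod esq 8 = f ∨ PySem.Int.mod esq 8 = f + 1) ∧
        ((color = 1 ∧ PySem.Int.floordiv esq 8 < r) ∨ (color = -1 ∧ PySem.Int.floordiv esq 8 > r))) := by
    intro esq
    unfold fpb_blocks
    simp only [Bool.and_eq_true, Bool.or_eq_true, beq_iff_eq, decide_eq_true_eq, or_assoc]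
  by_cases hc1 : color = 1
  · subst hc1
    constructor
    · rintro ⟨df, hdf, er, hget, h⟩
      have hlt : er < r := by
        rcases h with ⟨-, h⟩ | ⟨h, -⟩
        · exact h
        · exact absurd h (by norm_num)
      have := (fp_build_min_char enemy_pawns PySem.Dict.empty (f + df) r).mp ⟨er, hget, hlt⟩
      simp only [PySem.Dict.get?_empty, false_and, exists_false, false_or, reduceCtorEq] at this
      rcases this with ⟨esq, hm, hfd, hr⟩
      refine ⟨esq, hm, (hfpb esq).mpr ⟨?_, Or.inl ⟨rfl, hr⟩⟩⟩
      rw [hfd]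
      simp only [List.mem_cons, List.not_mem_nil, or_false] at hdf
      rcases hdf with rfl | rfl | rfl
      · left; ring
      · right; left; ring
      · right; right; rfl
    · rintro ⟨esq, hm, hb⟩
      obtain ⟨hadj, hcond⟩ := (hfpb esq).mp hb
      have hr : PySem.Int.floordiv esq 8 < r := by
        rcases hcond with ⟨-, h⟩ | ⟨h, -⟩
        · exact h
        · exact absurd h (by norm_num)
      have hP : ∃ df ∈ [(-1 : Int), 0, 1], PySem.Int.mod esq 8 = f + df := by
        rcases hadj with h | h | h
        · exact ⟨-1, List.mem_cons_self, by rw [h]; ring⟩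
        · exact ⟨0, by simp, by rw [h]; ring⟩
        · exact ⟨1, by simp, h⟩
      rcases hP with ⟨df, hdf, hfd⟩
      rcases (fp_build_min_char enemy_pawns PySem.Dict.empty (f + df) r).mpr
          (Or.inr ⟨esq, hm, hfd, hr⟩) with ⟨er, hget, hlt⟩
      exact ⟨df, hdf, er, hget, Or.inl ⟨rfl, hlt⟩⟩
  · by_cases hc2 : color = -1
    · subst hc2
      constructor
      · rintro ⟨df, hdf, er, hget, h⟩
        have hlt : er > r := by
          rcases h with ⟨h, -⟩ | ⟨-, h⟩
          · exact absurd h (by norm_num)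
          · exact h
        have := (fp_build_max_char enemy_pawns PySem.Dict.empty (f + df) r).mp ⟨er, hget, hlt⟩
        simp only [PySem.Dict.get?_empty, false_and, exists_false, false_or, reduceCtorEq] at this
        rcases this with ⟨esq, hm, hfd, hr⟩
        refine ⟨esq, hm, (hfpb esq).mpr ⟨?_, Or.inr ⟨rfl, hr⟩⟩⟩
        rw [hfd]
        simp only [List.mem_cons, List.not_mem_nil, or_false] at hdf
        rcases hdf with rfl | rfl | rfl
        · left; ring
        · right; left; ring
        · right; right; rfl
      · rintro ⟨esq, hm, hb⟩
        obtain ⟨hadj, hcond⟩ := (hfpb esq).mp hb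
        have hr : PySem.Int.floordiv esq 8 > r := by
          rcases hcond with ⟨h, -⟩ | ⟨-, h⟩
          · exact absurd h (by norm_num)
          · exact h
        have hP : ∃ df ∈ [(-1 : Int), 0, 1], PySem.Int.mod esq 8 = f + df := by
          rcases hadj with h | h | h
          · exact ⟨-1, List.mem_cons_self, by rw [h]; ring⟩
          · exact ⟨0, by simp, by rw [h]; ring⟩
          · exact ⟨1, by simp, h⟩
        rcases hP with ⟨df, hdf, hfd⟩
        rcases (fp_build_max_char enemy_pawns PySem.Dict.empty (f + df) r).mpr
            (Or.inr ⟨esq, hm, hfd, hr⟩) with ⟨er, hget, hlt⟩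
        exact ⟨df, hdf, er, hget, Or.inr ⟨rfl, hlt⟩⟩
    · constructor
      · rintro ⟨df, hdf, er, hget, (⟨h, -⟩ | ⟨h, -⟩)⟩
        · exact absurd h hc1
        · exact absurd h hc2
      · rintro ⟨esq, hm, hb⟩
        obtain ⟨-, hcond⟩ := (hfpb esq).mp hb
        rcases hcond with ⟨h, -⟩ | ⟨h, -⟩
        · exact absurd h hc1
        · exact absurd h hc2

-- ===== VERDICT (by name: the statement is the Claim_ definition above) =====
theorem find_passed_spec : Claim_equal_find_passed := by
  intro my_pawns enemy_pawns color _
  unfold Spec_find_passed find_passed find_passed_alt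
  have hf : ∀ (passed : List Int) (sq : Int),
      (if fp_blocked (enemy_pawns.foldl (fp_buildStep color) PySem.Dict.empty) color
            (PySem.Int.mod sq 8) (PySem.Int.floordiv sq 8) = false
        then PySem.Set.add passed sq else passed) =
      (if enemy_pawns.any (fpb_blocks color (PySem.Int.mod sq 8) (PySem.Int.floordiv sq 8))
        then passed else PySem.Set.add passed sq) := by
    intro passed sq
    rw [blocked_agree]
    cases h : enemy_pawns.any (fpb_blocks color (PySem.Int.mod sq 8) (PySem.Int.floordiv sq 8)) <;> simp
  simp only [hf]
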